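-- pv_equiv track=rewrite | github.com/YiweiT/Practice | Python/Reductor_Array.py | countComparator
-- ===== SOURCE A (Python) =====
-- def countComparator(a, b, k):
--     cnt = 0
--     for i in range(len(a)):
--         curNo = 0
--         for j in range(len(b)):
--             if abs(a[i] - b[j]) >= k:
--                 curNo += 1
--         if curNo == len(b):
--             cnt += 1
--     return cnt
-- ===== SOURCE B (Python) =====
-- def countComparator(a, b, k):
--     # Sort b once; for each x in a, binary-search for the first element
--     # >= x - k + 1 and check whether it lies inside the open band (x-k, x+k).
--     bs = sorted(b)
--     m = len(bs)
--     cnt = 0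
--     for x in a:
--         lo, hi = 0, m          # standard bisect_left loop for x - k + 1
--         target = x - k + 1
--         while lo < hi:
--             mid = (lo + hi) // 2
--             if bs[mid] < target:
--                 lo = mid + 1
--             else:
--                 hi = mid
--         if lo == m or bs[lo] >= x + k:
--             cnt += 1
--     return cnt
-- ===== Notes on version B (the rewrite author's own statement) =====
-- stated objective: faster
-- what changed: B sorts b once and replaces A's inner linear scan of b by a binary search (bisect_left) for the first element >= x-k+1, counting x when the open band (x-k, x+k) contains no element of b.
import Mathlib
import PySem

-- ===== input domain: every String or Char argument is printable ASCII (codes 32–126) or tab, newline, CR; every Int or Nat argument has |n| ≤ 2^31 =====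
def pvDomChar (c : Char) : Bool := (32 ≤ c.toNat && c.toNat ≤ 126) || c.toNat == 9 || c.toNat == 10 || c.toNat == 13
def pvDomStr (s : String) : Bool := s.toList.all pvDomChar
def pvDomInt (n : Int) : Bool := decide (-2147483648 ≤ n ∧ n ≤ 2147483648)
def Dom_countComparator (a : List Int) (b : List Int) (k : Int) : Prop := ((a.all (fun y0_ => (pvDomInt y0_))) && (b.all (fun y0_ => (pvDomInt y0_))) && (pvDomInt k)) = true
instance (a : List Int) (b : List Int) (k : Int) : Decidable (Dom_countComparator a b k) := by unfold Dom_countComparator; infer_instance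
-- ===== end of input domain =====

-- B sorts b once and answers each query by binary search instead of A's inner linear scan (asymptotically faster).


-- ===== PORT A =====
def countComparator (a : List Int) (b : List Int) (k : Int) : Int :=
  (PySem.List.pyRange 0 (PySem.List.len a) 1).foldl (fun cnt i =>
    let x := PySem.List.pyGetD a i 0
    let curNo : Int := (PySem.List.pyRange 0 (PySem.List.len b) 1).foldl (fun c j =>
      if k ≤ |x - PySem.List.pyGetD b j 0| then c + 1 else c) 0
    if curNo = PySem.List.len b then cnt + 1 else cnt) 0

-- ===== PORT B =====
-- Source B's hand-written lo/hi loop is the standard bisect_left binary search;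
-- PySem.List.bisectLeft is that exact loop, so the port cites it.
def countComparator_alt (a : List Int) (b : List Int) (k : Int) : Int :=
  let bs := PySem.List.sorted b (fun x => x) false
  a.foldl (fun cnt x =>
    let lo := PySem.List.bisectLeft bs (x - k + 1)
    if lo = bs.length ∨ x + k ≤ PySem.List.pyGetD bs (lo : Int) 0 then cnt + 1 else cnt) 0

-- ===== PRECONDITION & SPEC =====
def Spec_countComparator (a : List Int) (b : List Int) (k : Int) (out : Int) : Prop := out = countComparator_alt a b k
instance (a : List Int) (b : List Int) (k : Int) (out : Int) : Decidable (Spec_countComparator a b k out) := by unfold Spec_countComparator; infer_instance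

-- ===== CLAIM (what is proved, stated in full; the proofs are below) =====
def Claim_equal_countComparator : Prop := ∀ (a : List Int) (b : List Int) (k : Int), Dom_countComparator a b k → Spec_countComparator a b k (countComparator a b k)

-- ===== LEMMAS AND PROOFS =====

-- congruence for counting folds with pointwise-equivalent conditions
theorem pv_foldl_if_congr (l : List Int) (p q : Int → Prop) [DecidablePred p] [DecidablePred q]
    (h : ∀ x ∈ l, p x ↔ q x) (init : Int) :
    l.foldl (fun c x => if p x then c + 1 else c) init
      = l.foldl (fun c x => if q x then c + 1 else c) init := by
  apply PySem.List.foldl_congr_mem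
  intro acc x hx
  by_cases hp : p x
  · rw [if_pos hp, if_pos ((h x hx).mp hp)]
  · rw [if_neg hp, if_neg (fun hq => hp ((h x hx).mpr hq))]

-- A's value, as a fold over the elements of a with the 'all far' condition
theorem pv_A_eq (a b : List Int) (k : Int) :
    countComparator a b k
      = a.foldl (fun c x => if ∀ y ∈ b, k ≤ |x - y| then c + 1 else c) 0 := by
  unfold countComparator
  rw [PySem.List.foldl_pyRange_zero_pyGetD a 0
    (fun cnt x =>
      if ((PySem.List.pyRange 0 (PySem.List.len b) 1).foldl (fun c j =>
        if k ≤ |x - PySem.List.pyGetD b j 0| then c + 1 else c) 0 : Int) = PySem.List.len b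
      then cnt + 1 else cnt) 0]
  apply pv_foldl_if_congr
  intro x _
  rw [PySem.List.foldl_pyRange_zero_pyGetD b 0
    (fun c y => if k ≤ |x - y| then c + 1 else c) 0]
  have hcnt := PySem.List.foldl_count_if (fun y => decide (k ≤ |x - y|)) b 0
  simp only [decide_eq_true_eq] at hcnt
  rw [hcnt, PySem.List.len_eq]
  constructor
  · intro h y hy
    have : b.countP (fun y => decide (k ≤ |x - y|)) = b.length := by omega
    have := List.countP_eq_length.mp this y hy
    simpa using this
  · intro h
    have : b.countP (fun y => decide (k ≤ |x - y|)) = b.length :=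
      List.countP_eq_length.mpr (fun y hy => by simpa using h y hy)
    omega

-- the bisect condition on the sorted copy decides exactly 'all elements of b are far'
theorem pv_bisect_cond (b : List Int) (k x : Int) :
    (PySem.List.bisectLeft (PySem.List.sorted b (fun y => y) false) (x - k + 1)
        = (PySem.List.sorted b (fun y => y) false).length ∨
      x + k ≤ PySem.List.pyGetD (PySem.List.sorted b (fun y => y) false)
        ((PySem.List.bisectLeft (PySem.List.sorted b (fun y => y) false) (x - k + 1) : Int)) 0)
      ↔ (∀ y ∈ b, k ≤ |x - y|) := by
  set bs := PySem.List.sorted b (fun y => y) false with hbs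
  have hperm : bs.Perm b := PySem.List.sorted_perm b (fun y => y) false
  have hpair : bs.Pairwise (fun u v => u ≤ v) := PySem.List.sorted_pairwise b (fun y => y)
  obtain ⟨hle, hlt, hge⟩ := PySem.List.bisectLeft_spec bs (x - k + 1) hpair
  set lo := PySem.List.bisectLeft bs (x - k + 1) with hlo
  have hmem : ∀ y, y ∈ b ↔ y ∈ bs := fun y => (hperm.mem_iff).symm
  constructor
  · rintro hc y hy
    rw [hmem y] at hy
    obtain ⟨j, hj, rfl⟩ := List.mem_iff_getElem.mp hy
    by_cases hjlo : j < lo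
    · have := hlt j hj hjlo
      rcases abs_cases (x - bs[j]) with ⟨h, _⟩ | ⟨h, _⟩ <;> omega
    · have h1 := hge j hj (by omega)
      have hlolt : lo < bs.length := by omega
      rcases hc with hc | hc
      · omega
      · rw [PySem.List.pyGetD_natCast, List.getD_eq_getElem bs 0 hlolt] at hc
        have hmono : bs[lo] ≤ bs[j] := by
          rcases Nat.lt_or_ge lo j with h | h
          · exact List.pairwise_iff_getElem.mp hpair lo j hlolt hj h
          · have : lo = j := by omega
            simp [this]
        rcases abs_cases (x - bs[j]) with ⟨h, _⟩ | ⟨h, _⟩ <;> omega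
  · intro hall
    by_cases hend : lo = bs.length
    · exact Or.inl hend
    · right
      have hlolt : lo < bs.length := by omega
      have hmemlo : bs[lo] ∈ b := (hmem _).mpr (List.getElem_mem hlolt)
      have h1 := hge lo hlolt (le_refl lo)
      have h2 := hall _ hmemlo
      rw [PySem.List.pyGetD_natCast, List.getD_eq_getElem bs 0 hlolt]
      rcases abs_cases (x - bs[lo]) with ⟨h, _⟩ | ⟨h, _⟩ <;>
        rcases abs_cases (bs[lo] - x) with ⟨h3, _⟩ | ⟨h3, _⟩ <;> omega

theorem pv_B_eq (a b : List Int) (k : Int) :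
    countComparator_alt a b k
      = a.foldl (fun c x => if ∀ y ∈ b, k ≤ |x - y| then c + 1 else c) 0 := by
  unfold countComparator_alt
  apply pv_foldl_if_congr
  intro x _
  exact pv_bisect_cond b k x

-- ===== VERDICT (by name: the statement is the Claim_ definition above) =====
theorem countComparator_spec : Claim_equal_countComparator := by
  intro a b k _
  unfold Spec_countComparator
  rw [pv_A_eq, pv_B_eq]
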